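-- pv_equiv track=rewrite | github.com/ashee-b-bansaal/ASL-Translation-pipeline | alignment_without_LM.py | extract_recognized_emotion_with_frequency
-- ===== SOURCE A (Python) =====
-- from typing import Dict, Tuple, Optional, List
--
-- EMOTION_EXPRESSIONS = {"happy", "sad", "angry"}
--
-- def extract_recognized_emotion_with_frequency(recognized_str: str, ctc_sequence: str) -> Optional[str]:
--     """
--     Extract recognized emotion from recognized expression string.
--     If multiple emotions exist, choose the one with max frequency in CTC sequence.
--     If tie, choose the one that occurs first.
--
--     Args:
--         recognized_str: Recognized expression string (e.g., "angry" or "angry,cs,happy")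
--         ctc_sequence: CTC sequence string (e.g., "#,#,angry,angry,angry,angry,#,#,...")
--
--     Returns:
--         Emotion string ("happy", "sad", or "angry") or None if no emotion found
--     """
--     if not recognized_str or not recognized_str.strip():
--         return None
--
--     # Extract all emotions from recognized string
--     expressions = [e.strip() for e in recognized_str.split(',')]
--     emotions_in_recognized = [e for e in expressions if e.lower() in EMOTION_EXPRESSIONS]
--
--     if not emotions_in_recognized:
--         return None
--
--     # If only one emotion, return it
--     if len(emotions_in_recognized) == 1:
--         return emotions_in_recognized[0].lower()
--
--     # Multiple emotions: count frequency in CTC sequence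
--     ctc_tokens = [t.strip() for t in ctc_sequence.split(',')]
--     emotion_frequencies = {}
--     emotion_first_occurrence = {}
--
--     for emotion in emotions_in_recognized:
--         emotion_lower = emotion.lower()
--         count = ctc_tokens.count(emotion_lower)
--         emotion_frequencies[emotion_lower] = count
--
--         # Find first occurrence
--         try:
--             first_idx = ctc_tokens.index(emotion_lower)
--             emotion_first_occurrence[emotion_lower] = first_idx
--         except ValueError:
--             emotion_first_occurrence[emotion_lower] = float('inf')
--
--     # Find emotion with max frequency
--     max_freq = max(emotion_frequencies.values())
--     candidates = [emotion for emotion, freq in emotion_frequencies.items() if freq == max_freq]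
--
--     # If single candidate with max frequency, return it
--     if len(candidates) == 1:
--         return candidates[0]
--
--     # If tie, choose the one that occurs first
--     best_emotion = None
--     earliest_occurrence = float('inf')
--
--     for emotion in candidates:
--         first_occ = emotion_first_occurrence[emotion]
--         if first_occ < earliest_occurrence:
--             earliest_occurrence = first_occ
--             best_emotion = emotion
--
--     # If still tied (all have same first occurrence), return the first one in the recognized string
--     if best_emotion is None:
--         return emotions_in_recognized[0].lower()
--
--     return best_emotion
-- ===== SOURCE B (Python) =====
-- EMOTION_EXPRESSIONS = {"happy", "sad", "angry"}
--
-- def extract_recognized_emotion_with_frequency(recognized_str, ctc_sequence):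
--     if not recognized_str.strip():
--         return None
--     emotions = [el for el in (e.strip().lower() for e in recognized_str.split(','))
--                 if el in EMOTION_EXPRESSIONS]
--     if not emotions:
--         return None
--     if len(emotions) == 1:
--         return emotions[0]
--     recognized = []                      # distinct recognized emotions, in order
--     for e in emotions:
--         if e not in recognized:
--             recognized.append(e)
--     tokens = [t.strip() for t in ctc_sequence.split(',')]
--     # sort-then-group: occurrences of recognized emotions, sorted; equal emotions
--     # become one contiguous run whose length is the frequency and whose first
--     # index is the first occurrence (indices are distinct, so the order is total)
--     occ = [(t, i) for i, t in enumerate(tokens) if t in recognized]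
--     occ.sort()
--     best = None                          # ((count, -first), emotion) of best run
--     j = 0
--     while j < len(occ):
--         e, first = occ[j]
--         k = j + 1
--         while k < len(occ) and occ[k][0] == e:
--             k += 1
--         if best is None or best[0] < (k - j, -first):
--             best = ((k - j, -first), e)
--         j = k
--     # runs beat nothing only if no recognized emotion occurs at all: then every
--     # candidate ties completely and the first recognized emotion wins
--     return best[1] if best is not None else recognized[0]
-- ===== Notes on version B (the rewrite author's own statement) =====
-- stated objective: alternative
-- what changed: A counts and first-indexes each emotion with per-emotion ctc_tokens.count/.index scans, filters max-frequency candidates and tie-breaks in an explicit loop with an inf sentinel and fallback; B instead collects the (emotion, index) occurrences of recognized emotions, sorts them, and scans the sorted list run by run (run length = frequency, run head = first occurrence), keeping the best (count, -first) run, with the first recognized emotion as fallback when no emotion occurs.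
import Mathlib
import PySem

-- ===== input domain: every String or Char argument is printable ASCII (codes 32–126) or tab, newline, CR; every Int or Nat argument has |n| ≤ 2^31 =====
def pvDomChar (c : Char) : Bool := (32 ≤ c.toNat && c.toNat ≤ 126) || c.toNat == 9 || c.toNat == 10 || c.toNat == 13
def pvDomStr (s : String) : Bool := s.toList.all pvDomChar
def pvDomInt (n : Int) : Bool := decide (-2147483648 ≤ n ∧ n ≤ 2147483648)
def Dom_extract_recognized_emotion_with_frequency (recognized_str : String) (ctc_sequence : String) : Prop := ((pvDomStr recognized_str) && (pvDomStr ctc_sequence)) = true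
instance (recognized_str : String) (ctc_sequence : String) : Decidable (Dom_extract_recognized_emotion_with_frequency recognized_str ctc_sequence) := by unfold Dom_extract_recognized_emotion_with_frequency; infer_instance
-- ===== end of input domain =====

-- B replaces A's per-emotion count/index scans, candidate filter and tie-break loop by
-- sorting the recognized-emotion occurrences and scanning the runs (objective: alternative).

-- ===== PORT A =====

-- the module constant EMOTION_EXPRESSIONS (a set literal; only membership is used)
def pvEMO : PySem.Set String := ["happy", "sad", "angry"]

-- float('inf') is modelled as `none`: pvLtInf a b = (a < b) with none = +infinity
def pvLtInf : Option Int → Option Int → Bool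
  | none, _ => false
  | some _, none => true
  | some a, some b => decide (a < b)

def extract_recognized_emotion_with_frequency (recognized_str : String) (ctc_sequence : String) : Option String :=
  if recognized_str = "" || PySem.Str.strip recognized_str = "" then none
  else
    -- sep "," ≠ "", so split? is always some
    let expressions := ((PySem.Str.split? recognized_str ",").getD []).map PySem.Str.strip
    let emotions_in_recognized := expressions.filter (fun e => PySem.Set.contains pvEMO (PySem.Str.lower e))
    match emotions_in_recognized with
    | [] => none
    | [e] => some (PySem.Str.lower e)
    | e0 :: _ :: _ =>
      let ctc_tokens := ((PySem.Str.split? ctc_sequence ",").getD []).map PySem.Str.strip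
      -- the two dicts, built in the one `for emotion in emotions_in_recognized` loop
      let dicts := emotions_in_recognized.foldl
        (fun (st : PySem.Dict String Int × PySem.Dict String (Option Int)) emotion =>
          let el := PySem.Str.lower emotion
          (st.1.insert el (PySem.List.count ctc_tokens el : Int),
           -- try/except ValueError around .index: none = not found = float('inf')
           st.2.insert el ((PySem.List.index? ctc_tokens el).map Int.ofNat)))
        (PySem.Dict.empty, PySem.Dict.empty)
      match PySem.List.max? dicts.1.values (fun v => v) with
      | none => none   -- unreachable (values nonempty here; Python's max would raise on empty)
      | some max_freq =>
        let candidates := (dicts.1.items.filter (fun p => p.2 == max_freq)).map (fun p => p.1)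
        match candidates with
        | [c] => some c
        | _ =>
          let best := candidates.foldl
            (fun (st : Option String × Option Int) emotion =>
              -- key always present here: candidates are dict keys
              let first_occ := (dicts.2.get? emotion).join
              if pvLtInf first_occ st.2 then (some emotion, first_occ) else st)
            ((none : Option String), (none : Option Int))
          match best.1 with
          | none => some (PySem.Str.lower e0)
          | some b => some b

-- ===== PORT B =====

-- Python's `<` on a pair of int 2-tuples (used for `best[0] < cand`)
def pvKltB (p q : Int × Int) : Bool := decide (p.1 < q.1 ∨ (p.1 = q.1 ∧ p.2 < q.2))

-- the two while loops of Source B: walk the sorted occurrence list run by run,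
-- keeping the best ((count, -first), emotion) seen so far
def pvRuns : List (String × Int) → Option ((Int × Int) × String) → Option ((Int × Int) × String)
  | [], best => best
  | (e, first) :: rest, best =>
      -- inner while: the rest of the current run
      let run := rest.takeWhile (fun p => p.1 == e)
      let cand : Int × Int := (1 + run.length, -first)
      pvRuns (rest.dropWhile (fun p => p.1 == e))
        (match best with
         | none => some (cand, e)
         | some (bk, be) => if pvKltB bk cand then some (cand, e) else some (bk, be))
termination_by occ _ => occ.length
decreasing_by
  exact Nat.lt_succ_of_le (List.Sublist.length_le (List.dropWhile_sublist _))

def extract_recognized_emotion_with_frequency_alt (recognized_str : String) (ctc_sequence : String) : Option String :=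
  if PySem.Str.strip recognized_str = "" then none
  else
    -- sep "," ≠ "", so split? is always some
    let emotions := (((PySem.Str.split? recognized_str ",").getD []).map
        (fun e => PySem.Str.lower (PySem.Str.strip e))).filter (fun el => PySem.Set.contains pvEMO el)
    if emotions = [] then none
    else if PySem.List.len emotions == 1 then some (PySem.List.pyGetD emotions 0 "")
    else
      -- distinct recognized emotions, in order
      let recognized := emotions.foldl PySem.Set.add PySem.Set.empty
      let tokens := ((PySem.Str.split? ctc_sequence ",").getD []).map PySem.Str.strip
      -- occurrences of recognized emotions, sorted: runs = one emotion each
      let occ := ((PySem.List.enumerate tokens).filter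
          (fun p => PySem.Set.contains recognized p.2)).map (fun p => (p.2, p.1))
      let occs := PySem.List.sorted2 occ (fun p => p.1) (fun p => p.2)
      match pvRuns occs none with
      | some (_, e) => some e
      | none => some (PySem.List.pyGetD recognized 0 "")

-- ===== PRECONDITION & SPEC =====
def Spec_extract_recognized_emotion_with_frequency (recognized_str : String) (ctc_sequence : String) (out : Option String) : Prop := out = extract_recognized_emotion_with_frequency_alt recognized_str ctc_sequence
instance (recognized_str : String) (ctc_sequence : String) (out : Option String) : Decidable (Spec_extract_recognized_emotion_with_frequency recognized_str ctc_sequence out) := by unfold Spec_extract_recognized_emotion_with_frequency; infer_instance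

-- ===== CLAIM (what is proved, stated in full; the proofs are below) =====
def Claim_equal_extract_recognized_emotion_with_frequency : Prop := ∀ (recognized_str : String) (ctc_sequence : String), Dom_extract_recognized_emotion_with_frequency recognized_str ctc_sequence → Spec_extract_recognized_emotion_with_frequency recognized_str ctc_sequence (extract_recognized_emotion_with_frequency recognized_str ctc_sequence)

-- ===== LEMMAS AND PROOFS =====

theorem pvKltB_iff (p q : Int × Int) : pvKltB p q = true ↔ (p.1 < q.1 ∨ (p.1 = q.1 ∧ p.2 < q.2)) := by
  simp [pvKltB]

theorem pvKltB_asymm {p q : Int × Int} (h : pvKltB p q = true) : pvKltB q p = false := by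
  rw [pvKltB_iff] at h
  rw [Bool.eq_false_iff]
  intro hc
  rw [pvKltB_iff] at hc
  omega

-- ---- generic "keep the first strictly better element" fold machinery ----

def pvFold {α : Type} (c : α → α → Bool) (b : α) (t : List α) : α :=
  t.foldl (fun m x => if c m x then x else m) b

def pvKc {α : Type} (k : α → Int × Int) : α → α → Bool := fun m x => pvKltB (k m) (k x)

theorem pvFold_nil {α : Type} (c : α → α → Bool) (b : α) : pvFold c b [] = b := rfl

theorem pvFold_cons {α : Type} (c : α → α → Bool) (b x : α) (t : List α) :
    pvFold c b (x :: t) = pvFold c (if c b x then x else b) t := rfl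

theorem pvFold_mem {α : Type} (c : α → α → Bool) :
    ∀ (t : List α) (b : α), pvFold c b t = b ∨ pvFold c b t ∈ t := by
  intro t
  induction t with
  | nil => intro b; exact Or.inl rfl
  | cons x t ih =>
    intro b
    rw [pvFold_cons]
    rcases ih (if c b x then x else b) with h | h
    · rw [h]; split <;> simp
    · exact Or.inr (List.mem_cons_of_mem _ h)

theorem pvFold_keep {α : Type} (c : α → α → Bool) :
    ∀ (t : List α) (b : α), (∀ y ∈ t, c b y = false) → pvFold c b t = b := by
  intro t
  induction t with
  | nil => intro b _; rfl
  | cons x t ih =>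
    intro b h
    rw [pvFold_cons, h x (by simp)]
    exact ih b (fun y hy => h y (List.mem_cons_of_mem _ hy))

theorem pvFold_split {α : Type} (k : α → Int × Int) :
    ∀ (t : List α) (b : α), ∃ pre suf,
      b :: t = pre ++ (pvFold (pvKc k) b t) :: suf ∧
      (∀ y ∈ pre, pvKltB (k y) (k (pvFold (pvKc k) b t)) = true) ∧
      (∀ y ∈ suf, pvKltB (k (pvFold (pvKc k) b t)) (k y) = false) := by
  intro t
  induction t with
  | nil => intro b; exact ⟨[], [], rfl, by simp, by simp⟩
  | cons x t ih =>
    intro b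
    rw [pvFold_cons]
    by_cases hbx : pvKc k b x = true
    · rw [if_pos hbx]
      have hbx' : pvKltB (k b) (k x) = true := hbx
      obtain ⟨pre, suf, hsplit, hpre, hsuf⟩ := ih x
      refine ⟨b :: pre, suf, by rw [List.cons_append, ← hsplit], ?_, hsuf⟩
      intro y hy
      rcases List.mem_cons.mp hy with rfl | hy
      · cases pre with
        | nil =>
          obtain ⟨hx, -⟩ := List.cons_eq_cons.mp (by simpa using hsplit)
          rw [← hx]; exact hbx'
        | cons p ps =>
          rw [List.cons_append] at hsplit
          obtain ⟨hx, -⟩ := List.cons_eq_cons.mp hsplit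
          have h2 := hpre p (by simp)
          rw [← hx] at h2
          rw [pvKltB_iff] at *
          omega
      · exact hpre y hy
    · rw [if_neg hbx]
      obtain ⟨pre, suf, hsplit, hpre, hsuf⟩ := ih b
      cases pre with
      | nil =>
        obtain ⟨hb, ht⟩ := List.cons_eq_cons.mp (by simpa using hsplit)
        refine ⟨[], x :: t, by rw [List.nil_append, ← hb], by simp, ?_⟩
        intro y hy
        rcases List.mem_cons.mp hy with rfl | hy
        · rw [← hb]
          exact Bool.eq_false_iff.mpr hbx
        · rw [ht] at hy; exact hsuf y hy
      | cons p ps =>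
        rw [List.cons_append] at hsplit
        obtain ⟨hb, ht⟩ := List.cons_eq_cons.mp hsplit
        refine ⟨b :: x :: ps, suf, by rw [List.cons_append, List.cons_append, ← ht], ?_, hsuf⟩
        intro y hy
        have hbR : pvKltB (k b) (k (pvFold (pvKc k) b t)) = true := by
          have h2 := hpre p (by simp)
          rw [← hb] at h2; exact h2
        rcases List.mem_cons.mp hy with rfl | hy
        · exact hbR
        rcases List.mem_cons.mp hy with rfl | hy
        · have hxb : pvKltB (k b) (k y) = false := Bool.eq_false_iff.mpr hbx
          have h3 := pvKltB_iff (k b) (k y)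
          rw [hxb] at h3
          simp only [Bool.false_eq_true, false_iff] at h3
          rw [pvKltB_iff] at hbR ⊢
          omega
        · exact hpre y (by simp [hy])

theorem pvFold_append_evict {α : Type} (k : α → Int × Int) (ps suf : List α) (p r : α)
    (h1 : ∀ y ∈ p :: ps, pvKltB (k y) (k r) = true) (h2 : ∀ y ∈ suf, pvKltB (k r) (k y) = false) :
    pvFold (pvKc k) p (ps ++ r :: suf) = r := by
  have hmmem := pvFold_mem (pvKc k) ps p
  have hmr : pvKltB (k (pvFold (pvKc k) p ps)) (k r) = true := by
    rcases hmmem with h | h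
    · rw [h]; exact h1 p (by simp)
    · exact h1 _ (by simp [h])
  have hstep : pvKc k (pvFold (pvKc k) p ps) r = true := hmr
  unfold pvFold at *
  rw [show ps ++ r :: suf = (ps ++ [r]) ++ suf by simp, List.foldl_append, List.foldl_append]
  simp only [List.foldl_cons, List.foldl_nil]
  rw [hstep]
  simp only [if_true]
  exact pvFold_keep (pvKc k) suf r (fun y hy => h2 y hy)

theorem pvFold_congr_closed {α : Type} (S : List α) (c c' : α → α → Bool)
    (h : ∀ m ∈ S, ∀ x ∈ S, c m x = c' m x) :
    ∀ (t : List α) (b : α), b ∈ S → (∀ x ∈ t, x ∈ S) → pvFold c b t = pvFold c' b t := by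
  intro t
  induction t with
  | nil => intro b _ _; rfl
  | cons x t ih =>
    intro b hb ht
    have hx : x ∈ S := ht x (by simp)
    rw [pvFold_cons, pvFold_cons, h b hb x hx]
    have hnext : (if c' b x then x else b) ∈ S := by split <;> assumption
    exact ih _ hnext (fun y hy => ht y (List.mem_cons_of_mem _ hy))

-- max2?'s boolean step condition is pvKltB on the key pair
theorem pvMax2_cond {α : Type} (k1 k2 : α → Int) (m x : α) :
    (decide (k1 m < k1 x) || !decide (k1 x < k1 m) && decide (k2 m < k2 x))
      = pvKltB (k1 m, k2 m) (k1 x, k2 x) := by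
  by_cases h1 : k1 m < k1 x <;> by_cases h2 : k1 x < k1 m <;> by_cases h3 : k2 m < k2 x <;>
    simp [pvKltB, h1, h2, h3] <;> omega

theorem pvMax2_foldl {α : Type} (k1 k2 : α → Int) :
    ∀ (t : List α) (b : α),
      t.foldl (fun acc x => match acc with
        | none => some x
        | some m => if (decide (k1 m < k1 x) || !decide (k1 x < k1 m) && decide (k2 m < k2 x)) = true
                    then some x else some m) (some b)
      = some (pvFold (pvKc (fun y => (k1 y, k2 y))) b t) := by
  intro t
  induction t with
  | nil => intro b; rfl
  | cons x t ih =>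
    intro b
    rw [List.foldl_cons, pvFold_cons]
    show List.foldl _ (if (decide (k1 b < k1 x) || !decide (k1 x < k1 b) && decide (k2 b < k2 x)) = true then some x else some b) t = _
    rw [pvMax2_cond]
    by_cases h : pvKltB (k1 b, k2 b) (k1 x, k2 x) = true
    · rw [if_pos h, show pvKc (fun y => (k1 y, k2 y)) b x = true from h]
      simp only [if_true]
      exact ih x
    · rw [if_neg h, show pvKc (fun y => (k1 y, k2 y)) b x = false from Bool.eq_false_iff.mpr h]
      simp only [Bool.false_eq_true, if_false]
      exact ih b

theorem pvMax2_eq_of_split {α : Type} (k1 k2 : α → Int) (K pre suf : List α) (r : α)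
    (hK : K = pre ++ r :: suf)
    (h1 : ∀ y ∈ pre, pvKltB (k1 y, k2 y) (k1 r, k2 r) = true)
    (h2 : ∀ y ∈ suf, pvKltB (k1 r, k2 r) (k1 y, k2 y) = false) :
    PySem.List.max2? K k1 k2 = some r := by
  subst hK
  cases pre with
  | nil =>
    show List.foldl _ none (r :: suf) = some r
    rw [List.foldl_cons]
    refine (pvMax2_foldl k1 k2 suf r).trans ?_
    rw [pvFold_keep _ _ _ (fun y hy => h2 y hy)]
  | cons p ps =>
    show List.foldl _ none ((p :: ps) ++ r :: suf) = some r
    rw [List.cons_append, List.foldl_cons]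
    refine (pvMax2_foldl k1 k2 _ p).trans ?_
    rw [pvFold_append_evict (fun y => (k1 y, k2 y)) ps suf p r ?_ h2]
    intro y hy
    rcases List.mem_cons.mp hy with rfl | hy
    · exact h1 y (by simp)
    · exact h1 y (by simp [hy])

-- ---- A's tie-break loop characterised as a pvFold ----

theorem pvLoopNone (fiI : String → Option Int) :
    ∀ (C : List String) (st : Option String × Option Int), (∀ e ∈ C, fiI e = none) →
      C.foldl (fun st e => if pvLtInf (fiI e) st.2 then (some e, fiI e) else st) st = st := by
  intro C
  induction C with
  | nil => intro st _; rfl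
  | cons x t ih =>
    intro st h
    rw [List.foldl_cons, h x (by simp), show pvLtInf none st.2 = false from rfl]
    simp only [Bool.false_eq_true, if_false]
    exact ih st (fun e he => h e (List.mem_cons_of_mem _ he))

theorem pvLoopSome (fiI : String → Option Int) :
    ∀ (cs : List String) (m : String),
      cs.foldl (fun st e => if pvLtInf (fiI e) st.2 then (some e, fiI e) else st) (some m, fiI m)
      = (some (pvFold (fun m x => pvLtInf (fiI x) (fiI m)) m cs),
         fiI (pvFold (fun m x => pvLtInf (fiI x) (fiI m)) m cs)) := by
  intro cs
  induction cs with
  | nil => intro m; rfl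
  | cons x t ih =>
    intro m
    rw [List.foldl_cons, pvFold_cons]
    by_cases h : pvLtInf (fiI x) (fiI m) = true
    · rw [if_pos h, if_pos h]; exact ih x
    · rw [if_neg h, if_neg h]; exact ih m

-- ---- dict lookups of A's "value is a function of the key" insert loop ----

theorem pvGetFoldInsert {β : Type} (g : String → β) :
    ∀ (L : List String) (d : PySem.Dict String β) (k : String),
      (L.foldl (fun d e => d.insert e (g e)) d).get? k = if k ∈ L then some (g k) else d.get? k := by
  intro L
  induction L with
  | nil => intro d k; simp
  | cons e L ih =>
    intro d k
    rw [List.foldl_cons, ih]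
    by_cases hk : k ∈ L
    · simp [hk]
    · by_cases hke : k = e
      · subst hke; simp [hk, PySem.Dict.get?_insert_self]
      · simp [hk, hke, PySem.Dict.get?_insert_of_ne _ _ hke]

-- ---- values/items of A's "value is a function of the key" insert loop ----

theorem pvValuesFoldInsert {β : Type} [Inhabited β] (g : String → β) (L : List String) :
    (L.foldl (fun d e => d.insert e (g e)) PySem.Dict.empty).values
      = (PySem.Set.ofList L).map g := by
  have hkeys : (L.foldl (fun d e => d.insert e (g e)) PySem.Dict.empty).keys = PySem.Set.ofList L := by
    rw [PySem.Dict.keys_foldl_insert (f := fun _ e => g e)]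
    rw [PySem.Dict.keys_empty, PySem.Set.update_nil_left]
  have hnd : (L.foldl (fun d e => d.insert e (g e)) PySem.Dict.empty).keys.Nodup := by
    rw [hkeys]; exact PySem.Set.nodup_ofList L
  rw [PySem.Dict.values_eq_map_keys _ hnd default, hkeys]
  apply List.map_congr_left
  intro k hk
  have hkL : k ∈ L := (PySem.Set.mem_ofList _ _).mp hk
  rw [PySem.Dict.getD_eq_get?_getD, pvGetFoldInsert g L PySem.Dict.empty k, if_pos hkL]
  rfl

theorem pvItemsFoldInsert {β : Type} [Inhabited β] (g : String → β) (L : List String) :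
    (L.foldl (fun d e => d.insert e (g e)) PySem.Dict.empty).items
      = (PySem.Set.ofList L).map (fun e => (e, g e)) := by
  have hkeys : (L.foldl (fun d e => d.insert e (g e)) PySem.Dict.empty).keys = PySem.Set.ofList L := by
    rw [PySem.Dict.keys_foldl_insert (f := fun _ e => g e)]
    rw [PySem.Dict.keys_empty, PySem.Set.update_nil_left]
  have hnd : (L.foldl (fun d e => d.insert e (g e)) PySem.Dict.empty).keys.Nodup := by
    rw [hkeys]; exact PySem.Set.nodup_ofList L
  rw [PySem.Dict.items_eq_map_keys _ hnd default, hkeys]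
  apply List.map_congr_left
  intro k hk
  have hkL : k ∈ L := (PySem.Set.mem_ofList _ _).mp hk
  rw [PySem.Dict.getD_eq_get?_getD, pvGetFoldInsert g L PySem.Dict.empty k, if_pos hkL]
  rfl

-- ---- A's multi-emotion path, expressed over the distinct lowered emotions K ----

def pvASel (K : List String) (cnt : String → Int) (fiI : String → Option Int) : Option String :=
  match PySem.List.max? (K.map cnt) (fun v => v) with
  | none => none
  | some M =>
    match K.filter (fun k => cnt k == M) with
    | [c] => some c
    | _ =>
      match ((K.filter (fun k => cnt k == M)).foldl
              (fun st e => if pvLtInf (fiI e) st.2 then (some e, fiI e) else st)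
              ((none : Option String), (none : Option Int))).1 with
      | none => some (K.headD "")
      | some b => some b

theorem pvFilterSplit {α : Type} (p : α → Bool) :
    ∀ (K preC sufC : List α) (r : α), K.filter p = preC ++ r :: sufC →
      ∃ pre suf, K = pre ++ r :: suf ∧ pre.filter p = preC ∧ suf.filter p = sufC := by
  intro K
  induction K with
  | nil =>
    intro preC sufC r h
    simp only [List.filter_nil] at h
    cases preC <;> simp_all
  | cons x K ih =>
    intro preC sufC r h
    rw [List.filter_cons] at h
    by_cases hx : p x = true
    · rw [if_pos hx] at h
      cases preC with
      | nil =>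
        obtain ⟨hxr, hK⟩ := List.cons_eq_cons.mp (by simpa using h)
        exact ⟨[], K, by rw [List.nil_append, ← hxr], by simp, hK⟩
      | cons q qs =>
        obtain ⟨hxq, hK⟩ := List.cons_eq_cons.mp (by simpa using h)
        obtain ⟨pre, suf, h1, h2, h3⟩ := ih qs sufC r hK
        exact ⟨x :: pre, suf, by rw [List.cons_append, ← h1],
               by rw [List.filter_cons, if_pos hx, h2, hxq], h3⟩
    · rw [if_neg hx] at h
      obtain ⟨pre, suf, h1, h2, h3⟩ := ih preC sufC r h
      exact ⟨x :: pre, suf, by rw [List.cons_append, ← h1],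
             by rw [List.filter_cons, if_neg hx, h2], h3⟩

theorem pvCore (K : List String) (hne : K ≠ []) (cnt : String → Int) (fiI : String → Option Int) (n : Int)
    (hc0 : ∀ e ∈ K, 0 ≤ cnt e) (hnone : ∀ e ∈ K, (fiI e = none ↔ cnt e = 0)) :
    pvASel K cnt fiI = PySem.List.max2? K cnt (fun e => -((fiI e).getD n)) := by
  unfold pvASel
  cases hM : PySem.List.max? (K.map cnt) (fun v => v) with
  | none =>
    exact absurd (List.map_eq_nil_iff.mp ((PySem.List.max?_eq_none_iff _ _).mp hM)) hne
  | some M =>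
  dsimp only
  have hub : ∀ e ∈ K, cnt e ≤ M := fun e he =>
    PySem.List.max?_isMax hM (cnt e) (List.mem_map_of_mem he)
  have hattain : ∃ e ∈ K, cnt e = M := by
    obtain ⟨e, he, hce⟩ := List.mem_map.mp (PySem.List.max?_mem hM)
    exact ⟨e, he, hce⟩
  have hCmem : ∀ e ∈ K.filter (fun k => cnt k == M), e ∈ K ∧ cnt e = M := by
    intro e he
    obtain ⟨h1, h2⟩ := List.mem_filter.mp he
    exact ⟨h1, by simpa using h2⟩
  by_cases hM0 : M = 0
  · subst hM0
    have hall : ∀ e ∈ K, cnt e = 0 := fun e he => le_antisymm (hub e he) (hc0 e he)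
    have hfiI : ∀ e ∈ K, fiI e = none := fun e he => (hnone e he).mpr (hall e he)
    have hCK : K.filter (fun k => cnt k == (0 : Int)) = K :=
      List.filter_eq_self.mpr (fun e he => by simpa using hall e he)
    rw [hCK]
    obtain ⟨k0, kt, rfl⟩ := List.exists_cons_of_ne_nil hne
    have hB : PySem.List.max2? (k0 :: kt) cnt (fun e => -((fiI e).getD n)) = some k0 := by
      apply pvMax2_eq_of_split _ _ _ [] kt k0 rfl (by simp)
      intro y hy
      have h0 : cnt k0 = 0 := hall k0 (by simp)
      have hy0 : cnt y = 0 := hall y (by simp [hy])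
      have hf0 : fiI k0 = none := hfiI k0 (by simp)
      have hfy : fiI y = none := hfiI y (by simp [hy])
      rw [hf0, hfy, Bool.eq_false_iff]
      intro hc
      rw [pvKltB_iff] at hc
      simp only [h0, hy0, Option.getD_none] at hc
      omega
    cases kt with
    | nil => simpa using hB.symm
    | cons k1 kt' =>
      rw [pvLoopNone fiI _ _ (fun e he => hfiI e he)]
      simpa using hB.symm
  · have hM1 : 1 ≤ M := by
      obtain ⟨e, he, hce⟩ := hattain
      have := hc0 e he; omega
    have hCsome : ∀ e ∈ K.filter (fun k => cnt k == M), ∃ v, fiI e = some v := by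
      intro e he
      obtain ⟨h1, h2⟩ := hCmem e he
      cases hf : fiI e with
      | none =>
        exfalso
        have h0 : cnt e = 0 := (hnone e h1).mp hf
        omega
      | some v => exact ⟨v, rfl⟩
    cases hC : K.filter (fun k => cnt k == M) with
    | nil =>
      obtain ⟨e, he, hce⟩ := hattain
      have : e ∈ K.filter (fun k => cnt k == M) := List.mem_filter.mpr ⟨he, by simpa using hce⟩
      rw [hC] at this; simp at this
    | cons c0 cs =>
      have hc0C : c0 ∈ K.filter (fun k => cnt k == M) := by rw [hC]; simp
      have hcsC : ∀ x ∈ cs, x ∈ K.filter (fun k => cnt k == M) := by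
        intro x hx; rw [hC]; simp [hx]
      have hcongr : pvFold (fun m x => pvLtInf (fiI x) (fiI m)) c0 cs
          = pvFold (pvKc (fun e => (cnt e, -((fiI e).getD n)))) c0 cs := by
        apply pvFold_congr_closed (K.filter (fun k => cnt k == M)) _ _ ?_ cs c0 hc0C hcsC
        intro m hm x hx
        obtain ⟨vm, hvm⟩ := hCsome m hm
        obtain ⟨vx, hvx⟩ := hCsome x hx
        have hcm : cnt m = M := (hCmem m hm).2
        have hcx : cnt x = M := (hCmem x hx).2
        rw [hvm, hvx]
        show decide (vx < vm)
          = pvKltB (cnt m, -((fiI m).getD n)) (cnt x, -((fiI x).getD n))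
        rw [hvm, hvx, hcm, hcx]
        unfold pvKltB
        rw [decide_eq_decide]
        show vx < vm ↔ (M < M ∨ (M = M ∧ -((some vm).getD n) < -((some vx).getD n)))
        simp only [Option.getD_some, lt_self_iff_false, true_and, false_or]
        omega
      set r := pvFold (pvKc (fun e => (cnt e, -((fiI e).getD n)))) c0 cs with hr
      have hrC : r ∈ K.filter (fun k => cnt k == M) := by
        rcases pvFold_mem _ cs c0 with h | h
        · rw [hr, h]; exact hc0C
        · exact hcsC r h
      have hA : (match c0 :: cs with
          | [c] => some c
          | _ =>
            match ((c0 :: cs).foldl (fun st e => if pvLtInf (fiI e) st.2 then (some e, fiI e) else st)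
                ((none : Option String), (none : Option Int))).1 with
            | none => some (K.headD "")
            | some b => some b) = some r := by
        cases cs with
        | nil => simp [hr, pvFold_nil]
        | cons c1 cs' =>
          show (match (((c0 :: c1 :: cs').foldl (fun st e => if pvLtInf (fiI e) st.2 then (some e, fiI e) else st)
              ((none : Option String), (none : Option Int))).1) with
            | none => some (K.headD "")
            | some b => some b) = some r
          obtain ⟨v0, hv0⟩ := hCsome c0 hc0C
          rw [List.foldl_cons]
          rw [show (if pvLtInf (fiI c0) ((none : Option String), (none : Option Int)).2
                then ((some c0 : Option String), fiI c0)
                else ((none : Option String), (none : Option Int))) = (some c0, fiI c0) by rw [hv0]; rfl]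
          rw [pvLoopSome fiI (c1 :: cs') c0]
          rw [hcongr]
      rw [hA]
      obtain ⟨preC, sufC, hsplitC, hpreC, hsufC⟩ :=
        pvFold_split (fun e => (cnt e, -((fiI e).getD n))) cs c0
      rw [← hr] at hsplitC hpreC hsufC
      rw [← hC] at hsplitC
      obtain ⟨pre, suf, hKeq, hpreF, hsufF⟩ := pvFilterSplit _ K preC sufC r hsplitC
      have hcr : cnt r = M := (hCmem r hrC).2
      symm
      apply pvMax2_eq_of_split _ _ K pre suf r hKeq
      · intro y hy
        by_cases hpy : (cnt y == M) = true
        · have : y ∈ preC := by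
            rw [← hpreF]; exact List.mem_filter.mpr ⟨hy, hpy⟩
          exact hpreC y this
        · have hyK : y ∈ K := by rw [hKeq]; exact List.mem_append_left _ hy
          have hylt : cnt y < M := lt_of_le_of_ne (hub y hyK) (by simpa using hpy)
          rw [pvKltB_iff]
          left; omega
      · intro y hy
        by_cases hpy : (cnt y == M) = true
        · have : y ∈ sufC := by
            rw [← hsufF]; exact List.mem_filter.mpr ⟨hy, hpy⟩
          exact hsufC y this
        · have hyK : y ∈ K := by
            rw [hKeq]; exact List.mem_append_right _ (List.mem_cons_of_mem _ hy)
          have hylt : cnt y < M := lt_of_le_of_ne (hub y hyK) (by simpa using hpy)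
          rw [Bool.eq_false_iff]
          intro hc
          rw [pvKltB_iff] at hc
          simp only [hcr] at hc
          omega

-- ---- B-side: sorted occurrences split into per-emotion runs ----

theorem pvLexCond (a b : String × Int) :
    (decide (a.1 < b.1) || !decide (b.1 < a.1) && decide (a.2 < b.2))
      = decide ((toLex a : Lex (String × Int)) < toLex b) := by
  rcases lt_trichotomy a.1 b.1 with h | h | h
  · simp [Prod.Lex.lt_iff, h, lt_asymm h]
  · simp [Prod.Lex.lt_iff, h]
  · simp [Prod.Lex.lt_iff, h, lt_asymm h, ne_of_gt h]

theorem pvSorted2_eq_sorted_lex (xs : List (String × Int)) :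
    PySem.List.sorted2 xs (fun p => p.1) (fun p => p.2)
      = PySem.List.sorted xs (fun p => (toLex p : Lex (String × Int))) := by
  unfold PySem.List.sorted2 PySem.List.sorted
  simp only []
  rw [show (fun (a b : String × Int) => decide (a.1 < b.1) || !decide (b.1 < a.1) && decide (a.2 < b.2))
        = (fun (a b : String × Int) => decide ((toLex a : Lex (String × Int)) < toLex b)) from
      funext fun a => funext fun b => pvLexCond a b]
  simp

theorem pvEnumLB : ∀ (T : List String) (s : Int) (p : Int × String),
    p ∈ PySem.List.enumerate T s → s ≤ p.1 := by
  intro T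
  induction T with
  | nil => intro s p hp; simp [PySem.List.enumerate_nil] at hp
  | cons t ts ih =>
    intro s p hp
    rw [PySem.List.enumerate_cons] at hp
    rcases List.mem_cons.mp hp with rfl | hp
    · simp
    · have := ih (s + 1) p hp; omega

theorem pvEnumPairwise : ∀ (T : List String) (s : Int),
    (PySem.List.enumerate T s).Pairwise (fun p q => p.1 < q.1) := by
  intro T
  induction T with
  | nil => intro s; simp [PySem.List.enumerate_nil]
  | cons t ts ih =>
    intro s
    rw [PySem.List.enumerate_cons]
    exact List.Pairwise.cons (fun q hq => by have := pvEnumLB ts (s + 1) q hq; simp; omega) (ih (s + 1))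

theorem pvEnumFilterHead (e : String) : ∀ (T : List String) (s : Int),
    ((PySem.List.enumerate T s).filter (fun p => p.2 == e)).head?
      = (PySem.List.index? T e).map (fun j => (s + (j : Int), e)) := by
  intro T
  induction T with
  | nil => intro s; simp [PySem.List.enumerate_nil, PySem.List.index?]
  | cons t ts ih =>
    intro s
    rw [PySem.List.enumerate_cons, List.filter_cons]
    by_cases h : t = e
    · subst h
      rw [if_pos (by simp), PySem.List.index?_cons_self]
      simp
    · rw [if_neg (by simpa using h), ih (s + 1), PySem.List.index?_cons_of_ne _ h]
      cases PySem.List.index? ts e with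
      | none => rfl
      | some j =>
        show some ((s + 1) + (j : Int), e) = some (s + ((j + 1 : Nat) : Int), e)
        push_cast
        rw [show s + 1 + (j : Int) = s + ((j : Int) + 1) by ring]

theorem pvEnumFilterLength (e : String) (T : List String) :
    ((PySem.List.enumerate T 0).filter (fun p => p.2 == e)).length = T.count e := by
  rw [← List.countP_eq_length_filter]
  have h1 : List.countP (fun p => p.2 == e) (PySem.List.enumerate T 0)
      = List.countP (fun x => x == e) ((PySem.List.enumerate T 0).map (fun p => p.2)) := by
    rw [List.countP_map]
    rfl
  rw [h1, PySem.List.map_snd_enumerate]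
  rfl

-- the run ("block") of emotion e: its CTC occurrences (e, index), indices ascending
def pvBlk (T : List String) (e : String) : List (String × Int) :=
  ((PySem.List.enumerate T 0).filter (fun p => p.2 == e)).map (fun p => (p.2, p.1))

theorem pvBlk_fst (T : List String) (e : String) : ∀ q ∈ pvBlk T e, q.1 = e := by
  intro q hq
  obtain ⟨p, hp, rfl⟩ := List.mem_map.mp hq
  simpa using (List.mem_filter.mp hp).2

theorem pvBlk_length (T : List String) (e : String) : (pvBlk T e).length = T.count e := by
  unfold pvBlk
  rw [List.length_map]
  exact pvEnumFilterLength e T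

theorem pvBlk_head (T : List String) (e : String) :
    (pvBlk T e).head? = (PySem.List.index? T e).map (fun j => (e, (j : Int))) := by
  unfold pvBlk
  rw [List.head?_map, pvEnumFilterHead e T 0]
  cases PySem.List.index? T e with
  | none => rfl
  | some j => simp

theorem pvBlk_snd_pairwise (T : List String) (e : String) :
    (pvBlk T e).Pairwise (fun a b => a.2 < b.2) := by
  unfold pvBlk
  rw [List.pairwise_map]
  exact (pvEnumPairwise T 0).filter _

theorem pvOccFilter (K T : List String) (e : String) (he : e ∈ K) :
    (((PySem.List.enumerate T 0).filter (fun p => PySem.Set.contains K p.2)).map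
        (fun p => ((p.2 : String), (p.1 : Int)))).filter (fun q => q.1 == e) = pvBlk T e := by
  rw [List.filter_map, List.filter_filter]
  unfold pvBlk
  congr 1
  apply List.filter_congr
  intro p _
  show (((p.2, p.1).1 == e) && PySem.Set.contains K p.2) = (p.2 == e)
  by_cases hpe : p.2 = e
  · subst hpe
    simp [he]
  · simp [hpe]

theorem pvPermBlocks : ∀ (es : List String) (l : List (String × Int)), es.Nodup →
    (∀ q ∈ l, q.1 ∈ es) → l.Perm (es.flatMap (fun e => l.filter (fun q => q.1 == e))) := by
  intro es
  induction es with
  | nil =>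
    intro l _ hcov
    have : l = [] := List.eq_nil_iff_forall_not_mem.mpr (fun q hq => by simpa using hcov q hq)
    simp [this]
  | cons e es ih =>
    intro l hnd hcov
    rw [List.flatMap_cons]
    refine (List.filter_append_perm (fun q => q.1 == e) l).symm.trans ?_
    apply List.Perm.append_left
    have hrec := ih (l.filter (fun q => !(q.1 == e))) (List.nodup_cons.mp hnd).2 ?_
    · refine hrec.trans ?_
      rw [List.flatMap_def, List.flatMap_def]
      apply List.Perm.of_eq
      congr 1
      apply List.map_congr_left
      intro e' he'
      rw [List.filter_filter]
      apply List.filter_congr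
      intro q _
      have hne : e' ≠ e := by
        rintro rfl; exact (List.nodup_cons.mp hnd).1 he'
      by_cases hq : q.1 = e'
      · simp [hq, hne]
      · simp [hq]
    · intro q hq
      obtain ⟨hql, hqe⟩ := List.mem_filter.mp hq
      have := hcov q hql
      rcases List.mem_cons.mp this with h | h
      · exfalso; simp [h] at hqe
      · exact h

theorem pvLPairwise (T : List String) (es : List String) (hes : es.Pairwise (· < ·)) :
    (es.flatMap (fun e => pvBlk T e)).Pairwise
      (fun a b => (toLex a : Lex (String × Int)) < toLex b) := by
  rw [List.flatMap_def, List.pairwise_flatten]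
  constructor
  · intro l hl
    obtain ⟨e, -, rfl⟩ := List.mem_map.mp hl
    refine List.Pairwise.imp_of_mem ?_ (pvBlk_snd_pairwise T e)
    intro a b ha hb hab
    rw [Prod.Lex.lt_iff]
    right
    exact ⟨by rw [ofLex_toLex, ofLex_toLex, pvBlk_fst T e a ha, pvBlk_fst T e b hb], hab⟩
  · rw [List.pairwise_map]
    refine hes.imp ?_
    intro e1 e2 h x hx y hy
    rw [Prod.Lex.lt_iff]
    left
    rw [ofLex_toLex, ofLex_toLex, pvBlk_fst T e1 x hx, pvBlk_fst T e2 y hy]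
    exact h

theorem pvSortedBlocks (K T : List String) (hndK : K.Nodup) :
    PySem.List.sorted2
        (((PySem.List.enumerate T 0).filter (fun p => PySem.Set.contains K p.2)).map
          (fun p => ((p.2 : String), (p.1 : Int))))
        (fun p => p.1) (fun p => p.2)
      = (PySem.List.sorted (K.filter (fun e => decide (0 < T.count e))) (fun x => x)).flatMap
          (fun e => pvBlk T e) := by
  set occ := ((PySem.List.enumerate T 0).filter (fun p => PySem.Set.contains K p.2)).map
      (fun p => ((p.2 : String), (p.1 : Int))) with hocc
  set es := PySem.List.sorted (K.filter (fun e => decide (0 < T.count e))) (fun x => x) with hes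
  have hperm_es : es.Perm (K.filter (fun e => decide (0 < T.count e))) :=
    PySem.List.sorted_perm _ _ _
  have hnd_es : es.Nodup := hperm_es.nodup_iff.mpr (List.Nodup.filter _ hndK)
  have hmem_es : ∀ e, e ∈ es ↔ (e ∈ K ∧ 0 < T.count e) := by
    intro e
    rw [hperm_es.mem_iff, List.mem_filter]
    simp
  have hes_lt : es.Pairwise (· < ·) := by
    have h1 := PySem.List.sorted_pairwise (K.filter (fun e => decide (0 < T.count e))) (fun x => x)
    refine (List.Pairwise.and h1 hnd_es).imp ?_
    intro a b hab
    exact lt_of_le_of_ne hab.1 hab.2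
  have hcov : ∀ q ∈ occ, q.1 ∈ es := by
    intro q hq
    obtain ⟨p, hp, rfl⟩ := List.mem_map.mp hq
    obtain ⟨hpE, hpK⟩ := List.mem_filter.mp hp
    have hK : p.2 ∈ K := by simpa using hpK
    have hT : p.2 ∈ T := by
      have := List.mem_map_of_mem (f := fun x => x.2) hpE
      rwa [PySem.List.map_snd_enumerate] at this
    exact (hmem_es p.2).mpr ⟨hK, List.count_pos_iff.mpr hT⟩
  rw [pvSorted2_eq_sorted_lex]
  apply PySem.List.sorted_eq_of_perm_of_pairwise_lt
  · have h1 := pvPermBlocks es occ hnd_es hcov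
    have h2 : es.flatMap (fun e => occ.filter (fun q => q.1 == e))
        = es.flatMap (fun e => pvBlk T e) := by
      rw [List.flatMap_def, List.flatMap_def]
      congr 1
      apply List.map_congr_left
      intro e he
      exact pvOccFilter K T e ((hmem_es e).mp he).1
    rw [h2] at h1
    exact h1.symm
  · exact pvLPairwise T es hes_lt

-- ---- scanning the runs of the sorted occurrence list ----

theorem pvRuns_nil (best : Option ((Int × Int) × String)) : pvRuns [] best = best := by
  rw [pvRuns]

theorem pvRuns_cons (e : String) (first : Int) (rest : List (String × Int))
    (best : Option ((Int × Int) × String)) :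
    pvRuns ((e, first) :: rest) best
      = pvRuns (rest.dropWhile (fun p => p.1 == e))
          (match best with
           | none => some ((1 + (rest.takeWhile (fun p => p.1 == e)).length, -first), e)
           | some (bk, be) =>
             if pvKltB bk (1 + (rest.takeWhile (fun p => p.1 == e)).length, -first)
             then some ((1 + (rest.takeWhile (fun p => p.1 == e)).length, -first), e)
             else some (bk, be)) := by
  rw [pvRuns.eq_def]

theorem pvTakeDropAll {α : Type} (f : α → Bool) :
    ∀ (xs ys : List α), (∀ x ∈ xs, f x = true) → (∀ y ∈ ys, f y = false) →
      (xs ++ ys).takeWhile f = xs ∧ (xs ++ ys).dropWhile f = ys := by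
  intro xs
  induction xs with
  | nil =>
    intro ys _ hys
    cases ys with
    | nil => simp
    | cons y ys => simp [hys y (by simp)]
  | cons x xs ih =>
    intro ys hxs hys
    have hx : f x = true := hxs x (by simp)
    obtain ⟨h1, h2⟩ := ih ys (fun a ha => hxs a (List.mem_cons_of_mem _ ha)) hys
    simp [hx, h1, h2]

-- per-emotion key: (frequency in T, -(first occurrence in T))
def pvKeyOf (T : List String) (e : String) : Int × Int :=
  ((T.count e : Int), -(((PySem.List.index? T e).getD 0 : Nat) : Int))

def pvStep (b : Option ((Int × Int) × String)) (cand : Int × Int) (e : String) :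
    Option ((Int × Int) × String) :=
  match b with
  | none => some (cand, e)
  | some (bk, be) => if pvKltB bk cand then some (cand, e) else some (bk, be)

theorem pvRunsFlat (T : List String) :
    ∀ (es : List String) (best : Option ((Int × Int) × String)), es.Pairwise (· < ·) →
      (∀ e ∈ es, 0 < T.count e) →
      pvRuns (es.flatMap (fun e => pvBlk T e)) best
        = es.foldl (fun b e => pvStep b (pvKeyOf T e) e) best := by
  intro es
  induction es with
  | nil => intro best _ _; rw [List.flatMap_nil, pvRuns_nil, List.foldl_nil]
  | cons e es ih =>
    intro best hpw hcnt
    have hce : 0 < T.count e := hcnt e (by simp)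
    have hmem : e ∈ T := List.count_pos_iff.mp hce
    obtain ⟨j, hj⟩ : ∃ j, PySem.List.index? T e = some j := by
      cases hidx : PySem.List.index? T e with
      | none => exact absurd ((PySem.List.index?_eq_none_iff T e).mp hidx) (by simpa using hmem)
      | some j => exact ⟨j, rfl⟩
    obtain ⟨q0, qrest, hblk⟩ : ∃ q0 qrest, pvBlk T e = q0 :: qrest := by
      cases hb : pvBlk T e with
      | nil =>
        exfalso
        have := pvBlk_length T e
        rw [hb] at this
        simp at this
        omega
      | cons q0 qrest => exact ⟨q0, qrest, rfl⟩
    have hq0 : q0 = (e, (j : Int)) := by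
      have := pvBlk_head T e
      rw [hblk, hj] at this
      simpa using this
    have hqrest_fst : ∀ x ∈ qrest, x.1 = e := fun x hx =>
      pvBlk_fst T e x (by rw [hblk]; exact List.mem_cons_of_mem _ hx)
    have hrest_fst : ∀ x ∈ es.flatMap (fun e' => pvBlk T e'), (x.1 == e) = false := by
      intro x hx
      obtain ⟨e', he', hxe'⟩ := List.mem_flatMap.mp hx
      have hx1 : x.1 = e' := pvBlk_fst T e' x hxe'
      have : e < e' := (List.pairwise_cons.mp hpw).1 e' he'
      rw [hx1]
      exact beq_eq_false_iff_ne.mpr (ne_of_gt this)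
    rw [List.flatMap_cons, hblk, hq0, List.cons_append]
    rw [pvRuns_cons]
    obtain ⟨htake, hdrop⟩ := pvTakeDropAll (fun p => p.1 == e)
      qrest (es.flatMap (fun e' => pvBlk T e'))
      (fun x hx => beq_iff_eq.mpr (hqrest_fst x hx)) hrest_fst
    rw [htake, hdrop]
    have hcount : T.count e = qrest.length + 1 := by
      have h := pvBlk_length T e
      rw [hblk] at h
      simpa using h.symm
    have hkey : ((1 + ((qrest.length : Nat) : Int), -((j : Nat) : Int)) : Int × Int) = pvKeyOf T e := by
      unfold pvKeyOf
      rw [hj, hcount]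
      simp only [Option.getD_some]
      rw [show (((qrest.length + 1 : Nat)) : Int) = 1 + (qrest.length : Int) by push_cast; ring]
    rw [hkey]
    show pvRuns (es.flatMap fun e' => pvBlk T e') (pvStep best (pvKeyOf T e) e)
      = List.foldl (fun b e => pvStep b (pvKeyOf T e) e) best (e :: es)
    rw [List.foldl_cons]
    exact ih _ (List.Pairwise.of_cons hpw) (fun e' he' => hcnt e' (List.mem_cons_of_mem _ he'))

theorem pvStepFold (k : String → Int × Int) :
    ∀ (t : List String) (b : String),
      t.foldl (fun acc e => pvStep acc (k e) e) (some (k b, b))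
        = some (k (pvFold (pvKc k) b t), pvFold (pvKc k) b t) := by
  intro t
  induction t with
  | nil => intro b; rfl
  | cons x t ih =>
    intro b
    rw [List.foldl_cons, pvFold_cons]
    show t.foldl _ (if pvKltB (k b) (k x) then some (k x, x) else some (k b, b)) = _
    by_cases h : pvKltB (k b) (k x) = true
    · rw [if_pos h, show pvKc k b x = true from h]
      simp only [if_true]
      exact ih x
    · rw [if_neg h, show pvKc k b x = false from Bool.eq_false_iff.mpr h]
      simp only [Bool.false_eq_true, if_false]
      exact ih b

-- two emotions with the same first occurrence are equal
theorem pvIndexInj (T : List String) {y r : String} {j : Nat}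
    (hy : PySem.List.index? T y = some j) (hr : PySem.List.index? T r = some j) : y = r := by
  obtain ⟨pre, suf, hT, hlen, -⟩ := (PySem.List.index?_eq_some_iff T y j).mp hy
  obtain ⟨pre', suf', hT', hlen', -⟩ := (PySem.List.index?_eq_some_iff T r j).mp hr
  have h1 : T[j]? = some y := by
    rw [hT, List.getElem?_append_right (by omega)]
    simp [hlen]
  have h2 : T[j]? = some r := by
    rw [hT', List.getElem?_append_right (by omega)]
    simp [hlen']
  rw [h1] at h2
  exact (Option.some.injEq _ _).mp h2

theorem pvMax2_of_unique (k1 k2 : String → Int) (K : List String) (r : String) (hnd : K.Nodup)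
    (hr : r ∈ K) (hlt : ∀ y ∈ K, y ≠ r → pvKltB (k1 y, k2 y) (k1 r, k2 r) = true) :
    PySem.List.max2? K k1 k2 = some r := by
  obtain ⟨s, t, hK⟩ := List.mem_iff_append.mp hr
  have hnd' : (s ++ r :: t).Nodup := hK ▸ hnd
  rw [List.nodup_append] at hnd'
  apply pvMax2_eq_of_split k1 k2 K s t r hK
  · intro y hy
    have hyr : y ≠ r := hnd'.2.2 y hy r (by simp)
    exact hlt y (by rw [hK]; exact List.mem_append_left _ hy) hyr
  · intro y hy
    have hyr : y ≠ r := by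
      rintro rfl
      exact (List.nodup_cons.mp hnd'.2.1).1 hy
    exact pvKltB_asymm (hlt y (by rw [hK]; exact List.mem_append_right _ (List.mem_cons_of_mem _ hy)) hyr)

-- B's sorted-run scan equals the keyed max over the distinct recognized emotions
theorem pvBCore (K T : List String) (hnd : K.Nodup) (hne : K ≠ []) :
    (match pvRuns (PySem.List.sorted2
        (((PySem.List.enumerate T 0).filter (fun p => PySem.Set.contains K p.2)).map
          (fun p => ((p.2 : String), (p.1 : Int)))) (fun p => p.1) (fun p => p.2)) none with
     | some (_, e) => some e
     | none => some (PySem.List.pyGetD K 0 ""))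
    = PySem.List.max2? K (fun e => (PySem.List.count T e : Int))
        (fun e => -(((PySem.List.index? T e).map Int.ofNat).getD ((T.length : Int)))) := by
  have hmem_es : ∀ e, e ∈ PySem.List.sorted (K.filter (fun e => decide (0 < T.count e))) (fun x => x)
      ↔ (e ∈ K ∧ 0 < T.count e) := by
    intro e
    rw [(PySem.List.sorted_perm _ _ _).mem_iff, List.mem_filter]
    simp
  have hnd_es : (PySem.List.sorted (K.filter (fun e => decide (0 < T.count e))) (fun x => x)).Nodup :=
    (PySem.List.sorted_perm _ _ _).nodup_iff.mpr (List.Nodup.filter _ hnd)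
  have hes_lt : (PySem.List.sorted (K.filter (fun e => decide (0 < T.count e))) (fun x => x)).Pairwise (· < ·) := by
    refine (List.Pairwise.and (PySem.List.sorted_pairwise _ (fun x => x)) hnd_es).imp ?_
    intro a b hab
    exact lt_of_le_of_ne hab.1 hab.2
  rw [pvSortedBlocks K T hnd]
  cases hE : PySem.List.sorted (K.filter (fun e => decide (0 < T.count e))) (fun x => x) with
  | nil =>
    rw [List.flatMap_nil, pvRuns_nil]
    have hall : ∀ e ∈ K, T.count e = 0 := by
      intro e he
      by_contra h
      have : e ∈ PySem.List.sorted (K.filter (fun e => decide (0 < T.count e))) (fun x => x) :=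
        (hmem_es e).mpr ⟨he, Nat.pos_of_ne_zero h⟩
      rw [hE] at this
      simp at this
    obtain ⟨k0, kt, rfl⟩ := List.exists_cons_of_ne_nil hne
    have hRHS : PySem.List.max2? (k0 :: kt) (fun e => (PySem.List.count T e : Int))
        (fun e => -(((PySem.List.index? T e).map Int.ofNat).getD ((T.length : Int)))) = some k0 := by
      apply pvMax2_eq_of_split _ _ _ [] kt k0 rfl (by simp)
      intro y hy
      have hnone : ∀ e ∈ (k0 :: kt), PySem.List.index? T e = none := by
        intro e he
        rw [PySem.List.index?_eq_none_iff]
        intro hmem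
        have := hall e he
        rw [← List.count_pos_iff] at hmem
        omega
      rw [Bool.eq_false_iff]
      intro hc
      rw [pvKltB_iff] at hc
      simp only [hnone k0 (by simp), hnone y (by simp [hy]), Option.map_none, Option.getD_none,
        PySem.List.count_eq, hall k0 (by simp), hall y (by simp [hy])] at hc
      omega
    rw [hRHS]
    show some (PySem.List.pyGetD (k0 :: kt) 0 "") = some k0
    simp [PySem.List.pyGetD]
  | cons h t =>
    have hes_mem : ∀ e ∈ (h :: t), e ∈ K ∧ 0 < T.count e := by
      intro e he
      exact (hmem_es e).mp (by rw [hE]; exact he)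
    rw [pvRunsFlat T (h :: t) none (by rw [← hE]; exact hes_lt)
      (fun e he => (hes_mem e he).2), List.foldl_cons,
      show pvStep none (pvKeyOf T h) h = some (pvKeyOf T h, h) from rfl,
      pvStepFold (pvKeyOf T) t h]
    set R := pvFold (pvKc (pvKeyOf T)) h t with hR
    have hRes : R ∈ (h :: t) := by
      rcases pvFold_mem (pvKc (pvKeyOf T)) t h with hh | hh
      · rw [hR, hh]; simp
      · exact List.mem_cons_of_mem _ hh
    have hidx : ∀ e ∈ (h :: t), ∃ j, PySem.List.index? T e = some j := by
      intro e he
      cases hx : PySem.List.index? T e with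
      | none =>
        exact absurd ((PySem.List.index?_eq_none_iff T e).mp hx) (not_not_intro (List.count_pos_iff.mp (hes_mem e he).2))
      | some j => exact ⟨j, rfl⟩
    have hagree : ∀ e ∈ (h :: t),
        (((PySem.List.count T e : Nat) : Int),
          -(((PySem.List.index? T e).map Int.ofNat).getD ((T.length : Int)))) = pvKeyOf T e := by
      intro e he
      obtain ⟨j, hj⟩ := hidx e he
      unfold pvKeyOf
      rw [hj, PySem.List.count_eq]
      simp
    have hdist : ∀ y ∈ (h :: t), ∀ r ∈ (h :: t), pvKeyOf T y = pvKeyOf T r → y = r := by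
      intro y hy r hr hk
      obtain ⟨jy, hjy⟩ := hidx y hy
      obtain ⟨jr, hjr⟩ := hidx r hr
      unfold pvKeyOf at hk
      rw [hjy, hjr] at hk
      simp only [Option.getD_some, Prod.mk.injEq, neg_inj, Nat.cast_inj] at hk
      exact pvIndexInj T hjy (hk.2 ▸ hjr)
    show some R = _
    symm
    apply pvMax2_of_unique _ _ K R hnd (hes_mem R hRes).1
    intro y hy hyR
    show pvKltB
        (((PySem.List.count T y : Nat) : Int),
          -(((PySem.List.index? T y).map Int.ofNat).getD ((T.length : Int))))
        (((PySem.List.count T R : Nat) : Int),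
          -(((PySem.List.index? T R).map Int.ofNat).getD ((T.length : Int)))) = true
    rw [hagree R hRes]
    by_cases hyes : 0 < T.count y
    · have hyel : y ∈ (h :: t) := by
        rw [← hE]
        exact (hmem_es y).mpr ⟨hy, hyes⟩
      rw [hagree y hyel]
      obtain ⟨pre, suf, hsplit, hpre, hsuf⟩ := pvFold_split (pvKeyOf T) t h
      rw [← hR] at hsplit hpre hsuf
      rw [hsplit] at hyel
      rcases List.mem_append.mp hyel with hyp | hyp
      · exact hpre y hyp
      rcases List.mem_cons.mp hyp with rfl | hyp
      · exact absurd rfl hyR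
      · have hf := hsuf y hyp
        have hne2 : pvKeyOf T y ≠ pvKeyOf T R := by
          intro hk
          exact hyR (hdist y (by rw [hsplit]; exact List.mem_append_right _ (List.mem_cons_of_mem _ hyp)) R hRes hk)
        have hf' := pvKltB_iff (pvKeyOf T R) (pvKeyOf T y)
        rw [hf] at hf'
        simp only [Bool.false_eq_true, false_iff] at hf'
        have hne2' : ¬((pvKeyOf T y).1 = (pvKeyOf T R).1 ∧ (pvKeyOf T y).2 = (pvKeyOf T R).2) :=
          fun hk => hne2 (Prod.ext_iff.mpr hk)
        rw [pvKltB_iff]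
        omega
    · have hcy : T.count y = 0 := by omega
      have hjy : PySem.List.index? T y = none := by
        rw [PySem.List.index?_eq_none_iff]
        intro hm
        rw [← List.count_pos_iff] at hm
        omega
      rw [pvKltB_iff]
      left
      show ((PySem.List.count T y : Nat) : Int) < (pvKeyOf T R).1
      rw [PySem.List.count_eq, hcy]
      have hcR : 0 < T.count R := (hes_mem R hRes).2
      unfold pvKeyOf
      show ((0 : Nat) : Int) < ((List.count R T : Nat) : Int)
      exact_mod_cast hcR

-- ===== VERDICT (by name: the statement is the Claim_ definition above) =====
theorem extract_recognized_emotion_with_frequency_spec : Claim_equal_extract_recognized_emotion_with_frequency := by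
  intro r c _
  unfold Spec_extract_recognized_emotion_with_frequency
  unfold extract_recognized_emotion_with_frequency extract_recognized_emotion_with_frequency_alt
  by_cases hs : PySem.Str.strip r = ""
  · simp [hs]
  · have hr : ¬ (r = "") := by
      intro h; subst h; exact hs (by decide)
    simp only [hr, hs, decide_false, Bool.or_self, Bool.false_eq_true, if_false]
    have hBem : ((((PySem.Str.split? r ",").getD []).map (fun e => PySem.Str.lower (PySem.Str.strip e))).filter
          (fun el => PySem.Set.contains pvEMO el))
        = ((((PySem.Str.split? r ",").getD []).map PySem.Str.strip).filter
            (fun e => PySem.Set.contains pvEMO (PySem.Str.lower e))).map PySem.Str.lower := by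
      rw [show (fun e => PySem.Str.lower (PySem.Str.strip e)) = (PySem.Str.lower ∘ PySem.Str.strip) from rfl,
        ← List.map_map, List.filter_map]
      rfl
    rw [hBem]
    cases hE : (((PySem.Str.split? r ",").getD []).map PySem.Str.strip).filter
        (fun e => PySem.Set.contains pvEMO (PySem.Str.lower e)) with
    | nil => simp
    | cons e0 tl =>
      cases tl with
      | nil => simp
      | cons e1 rest =>
        simp only [List.map_cons]
        rw [if_neg (show ¬(PySem.Str.lower e0 :: PySem.Str.lower e1 :: List.map PySem.Str.lower rest = []) by simp)]
        rw [if_neg (show ¬((PySem.List.len (PySem.Str.lower e0 :: PySem.Str.lower e1 :: List.map PySem.Str.lower rest) == 1) = true) by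
          simp [PySem.List.len_eq]; omega)]
        have hfold :
            (e0 :: e1 :: rest).foldl
              (fun (st : PySem.Dict String Int × PySem.Dict String (Option Int)) emotion =>
                (st.1.insert (PySem.Str.lower emotion)
                   (PySem.List.count (((PySem.Str.split? c ",").getD []).map PySem.Str.strip) (PySem.Str.lower emotion) : Int),
                 st.2.insert (PySem.Str.lower emotion)
                   ((PySem.List.index? (((PySem.Str.split? c ",").getD []).map PySem.Str.strip) (PySem.Str.lower emotion)).map Int.ofNat)))
              (PySem.Dict.empty, PySem.Dict.empty)
            = ((e0 :: e1 :: rest).map PySem.Str.lower).foldl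
              (fun (st : PySem.Dict String Int × PySem.Dict String (Option Int)) el =>
                (st.1.insert el
                   (PySem.List.count (((PySem.Str.split? c ",").getD []).map PySem.Str.strip) el : Int),
                 st.2.insert el
                   ((PySem.List.index? (((PySem.Str.split? c ",").getD []).map PySem.Str.strip) el).map Int.ofNat)))
              (PySem.Dict.empty, PySem.Dict.empty) :=
          (List.foldl_map (f := PySem.Str.lower)
            (g := fun (st : PySem.Dict String Int × PySem.Dict String (Option Int)) el =>
              (st.1.insert el
                 (PySem.List.count (((PySem.Str.split? c ",").getD []).map PySem.Str.strip) el : Int),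
               st.2.insert el
                 ((PySem.List.index? (((PySem.Str.split? c ",").getD []).map PySem.Str.strip) el).map Int.ofNat)))
            (l := e0 :: e1 :: rest) (init := (PySem.Dict.empty, PySem.Dict.empty))).symm
        rw [hfold]
        simp only [List.map_cons]
        set T := List.map PySem.Str.strip ((PySem.Str.split? c ",").getD []) with hT
        rw [PySem.List.foldl_prod_mk
            (f := fun (d : PySem.Dict String Int) el => d.insert el (PySem.List.count T el : Int))
            (g := fun (d : PySem.Dict String (Option Int)) el =>
              d.insert el ((PySem.List.index? T el).map Int.ofNat))]
        dsimp only
        rw [pvValuesFoldInsert (fun el => (PySem.List.count T el : Int))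
            (PySem.Str.lower e0 :: PySem.Str.lower e1 :: List.map PySem.Str.lower rest)]
        rw [pvItemsFoldInsert (fun el => (PySem.List.count T el : Int))
            (PySem.Str.lower e0 :: PySem.Str.lower e1 :: List.map PySem.Str.lower rest)]
        -- ---- B side: the distinct-emotion set, then pvBCore + pvCore ----
        rw [show PySem.Set.empty = ([] : List String) from rfl,
          ← PySem.Set.ofList_eq_foldl (PySem.Str.lower e0 :: PySem.Str.lower e1 :: List.map PySem.Str.lower rest)]
        rw [pvBCore (PySem.Set.ofList (PySem.Str.lower e0 :: PySem.Str.lower e1 :: List.map PySem.Str.lower rest)) T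
          (PySem.Set.nodup_ofList _)
          (by rw [PySem.Set.ofList_cons]; exact List.cons_ne_nil _ _)]
        rw [← pvCore (PySem.Set.ofList (PySem.Str.lower e0 :: PySem.Str.lower e1 :: List.map PySem.Str.lower rest))
            (by rw [PySem.Set.ofList_cons]; exact List.cons_ne_nil _ _)
            (fun e => (PySem.List.count T e : Int))
            (fun e => (PySem.List.index? T e).map Int.ofNat)
            ((T.length : Int))
            (fun e _ => Int.natCast_nonneg _)
            (fun e _ => by
              show (PySem.List.index? T e).map Int.ofNat = none ↔ (PySem.List.count T e : Int) = 0
              constructor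
              · intro h
                have hnmem : e ∉ T := (PySem.List.index?_eq_none_iff _ _).mp (Option.map_eq_none_iff.mp h)
                rw [PySem.List.count_eq]
                simp [List.count_eq_zero.mpr hnmem]
              · intro h
                have : T.count e = 0 := by
                  rw [PySem.List.count_eq] at h
                  exact_mod_cast h
                have hnmem : e ∉ T := List.count_eq_zero.mp this
                rw [(PySem.List.index?_eq_none_iff _ _).mpr hnmem]
                rfl)]
        -- ---- A side: reduce the port's branches to pvASel ----
        unfold pvASel
        cases hMv : PySem.List.max?
            ((PySem.Set.ofList (PySem.Str.lower e0 :: PySem.Str.lower e1 :: List.map PySem.Str.lower rest)).map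
              (fun el => (PySem.List.count T el : Int))) (fun v => v) with
        | none => rfl
        | some M =>
          dsimp only
          have hcand : (((PySem.Set.ofList (PySem.Str.lower e0 :: PySem.Str.lower e1 :: List.map PySem.Str.lower rest)).map
                  (fun el => (el, (PySem.List.count T el : Int)))).filter
                (fun p => p.2 == M)).map (fun p => p.1)
              = (PySem.Set.ofList (PySem.Str.lower e0 :: PySem.Str.lower e1 :: List.map PySem.Str.lower rest)).filter
                (fun k => (PySem.List.count T k : Int) == M) := by
            rw [List.filter_map, List.map_map]
            simp [Function.comp_def]
          rw [hcand]
          cases hC2 : (PySem.Set.ofList (PySem.Str.lower e0 :: PySem.Str.lower e1 :: List.map PySem.Str.lower rest)).filter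
              (fun k => (PySem.List.count T k : Int) == M) with
          | nil =>
            show some (PySem.Str.lower e0)
              = some ((PySem.Set.ofList (PySem.Str.lower e0 :: PySem.Str.lower e1 :: List.map PySem.Str.lower rest)).headD "")
            simp [PySem.Set.ofList_cons]
          | cons c0 cs =>
            have hmemL : ∀ x ∈ c0 :: cs,
                x ∈ PySem.Str.lower e0 :: PySem.Str.lower e1 :: List.map PySem.Str.lower rest := by
              intro x hx
              rw [← hC2] at hx
              exact (PySem.Set.mem_ofList _ _).mp (List.mem_filter.mp hx).1
            have hjoin : ∀ x ∈ c0 :: cs,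
                (((PySem.Str.lower e0 :: PySem.Str.lower e1 :: List.map PySem.Str.lower rest).foldl
                    (fun (d : PySem.Dict String (Option Int)) el =>
                      d.insert el ((PySem.List.index? T el).map Int.ofNat))
                    PySem.Dict.empty).get? x).join
                  = (PySem.List.index? T x).map Int.ofNat := by
              intro x hx
              rw [pvGetFoldInsert (fun el => (PySem.List.index? T el).map Int.ofNat) _ _ x,
                if_pos (hmemL x hx)]
              rfl
            have hloop : (c0 :: cs).foldl
                (fun (st : Option String × Option Int) emotion =>
                  if pvLtInf ((((PySem.Str.lower e0 :: PySem.Str.lower e1 :: List.map PySem.Str.lower rest).foldl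
                        (fun (d : PySem.Dict String (Option Int)) el =>
                          d.insert el ((PySem.List.index? T el).map Int.ofNat))
                        PySem.Dict.empty).get? emotion).join) st.2
                  then (some emotion,
                        (((PySem.Str.lower e0 :: PySem.Str.lower e1 :: List.map PySem.Str.lower rest).foldl
                          (fun (d : PySem.Dict String (Option Int)) el =>
                            d.insert el ((PySem.List.index? T el).map Int.ofNat))
                          PySem.Dict.empty).get? emotion).join)
                  else st)
                ((none : Option String), (none : Option Int))
              = (c0 :: cs).foldl
                (fun (st : Option String × Option Int) emotion =>
                  if pvLtInf ((PySem.List.index? T emotion).map Int.ofNat) st.2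
                  then (some emotion, (PySem.List.index? T emotion).map Int.ofNat)
                  else st)
                ((none : Option String), (none : Option Int)) := by
              apply PySem.List.foldl_congr_mem
              intro acc x hx
              rw [hjoin x hx]
            cases cs with
            | nil => rfl
            | cons c1 cs' =>
              rw [hloop]
              have hhead : (some (PySem.Str.lower e0) : Option String)
                  = some ((PySem.Set.ofList (PySem.Str.lower e0 :: PySem.Str.lower e1 :: List.map PySem.Str.lower rest)).headD "") := by
                simp [PySem.Set.ofList_cons]
              rw [hhead]
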